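-- pv_equiv track=rewrite | github.com/HishamBS/dojutsu | skills/rinnegan/scripts/bundle_renderer.py | _slug_anchor
-- ===== SOURCE A (Python) =====
-- def _slug_anchor(text: str) -> str:
--     lowered = text.lower()
--     normalized = []
--     previous_dash = False
--     for char in lowered:
--         if char.isalnum():
--             normalized.append(char)
--             previous_dash = False
--         elif not previous_dash:
--             normalized.append("-")
--             previous_dash = True
--     return "".join(normalized).strip("-")
-- ===== SOURCE B (Python) =====
-- def _slug_anchor(text: str) -> str:
--     mapped = [c if c.isalnum() else "-" for c in text.lower()]
--     collapsed = "".join(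
--         ch for ch, prev in zip(mapped, [" "] + mapped) if ch != "-" or prev != "-"
--     )
--     return collapsed.strip("-")
-- ===== Notes on version B (the rewrite author's own statement) =====
-- stated objective: alternative
-- what changed: Replaces A's single stateful pass with a previous_dash flag by a stateless two-pass decomposition: first map each character to itself if alphanumeric else a dash, then zip the mapped list with its shifted self to drop each dash whose predecessor is also a dash, then strip.
import Mathlib
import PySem

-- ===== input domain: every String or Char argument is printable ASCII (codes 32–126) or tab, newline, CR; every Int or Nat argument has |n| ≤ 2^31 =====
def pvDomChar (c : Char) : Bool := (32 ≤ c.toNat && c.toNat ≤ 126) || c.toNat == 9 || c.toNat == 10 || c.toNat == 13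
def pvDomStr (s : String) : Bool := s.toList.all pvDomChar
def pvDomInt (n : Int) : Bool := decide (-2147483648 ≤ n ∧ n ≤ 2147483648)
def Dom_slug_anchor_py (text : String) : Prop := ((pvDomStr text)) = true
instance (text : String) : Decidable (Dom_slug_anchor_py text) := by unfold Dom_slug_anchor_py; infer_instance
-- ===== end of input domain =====

-- B replaces A's single stateful previous_dash pass by a stateless map-then-collapse two-pass decomposition (alternative, same cost).

-- ===== PORT A =====
-- A's loop body: state = (normalized list, previous_dash flag)
def pvStepA (acc : List Char × Bool) (char : Char) : List Char × Bool :=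
  if PySem.Str.isalnum char then (acc.1 ++ [char], false)
  else if !acc.2 then (acc.1 ++ ['-'], true)
  else acc

-- "".join of the 1-char appends = String.ofList of the list.
def slug_anchor_py (text : String) : String :=
  let lowered := PySem.Str.lower text
  let st := lowered.toList.foldl pvStepA ([], false)
  PySem.Str.stripChars (String.ofList st.1) "-"

-- ===== PORT B =====
-- Source B: mapped list comprehension; zip(mapped, [' ']+mapped) pairs each char with its predecessor.
def slug_anchor_py_alt (text : String) : String :=
  let mapped := (PySem.Str.lower text).toList.map
    (fun c => if PySem.Str.isalnum c then c else '-')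
  let collapsed := (mapped.zip (' ' :: mapped)).filterMap
    (fun p => if p.1 ≠ '-' ∨ p.2 ≠ '-' then some p.1 else none)
  PySem.Str.stripChars (String.ofList collapsed) "-"

-- ===== PRECONDITION & SPEC =====
def Spec_slug_anchor_py (text : String) (out : String) : Prop := out = slug_anchor_py_alt text
instance (text : String) (out : String) : Decidable (Spec_slug_anchor_py text out) := by unfold Spec_slug_anchor_py; infer_instance

-- ===== CLAIM (what is proved, stated in full; the proofs are below) =====
def Claim_equal_slug_anchor_py : Prop := ∀ (text : String), Dom_slug_anchor_py text → Spec_slug_anchor_py text (slug_anchor_py text)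

-- ===== LEMMAS AND PROOFS =====

-- canonical collapse of consecutive dashes, parameterised by "previous char was a dash"
def pvCollapse : Bool → List Char → List Char
  | _, [] => []
  | pd, c :: rest =>
    if c = '-' then (if pd then pvCollapse true rest else '-' :: pvCollapse true rest)
    else c :: pvCollapse false rest

lemma pv_isalnum_ne_dash (c : Char) (h : PySem.Str.isalnum c = true) : c ≠ '-' := by
  intro hc; subst hc; exact absurd h (by decide)

lemma pvA_loop (l : List Char) : ∀ (acc : List Char) (pd : Bool),
    (l.foldl pvStepA (acc, pd)).1
      = acc ++ pvCollapse pd (l.map (fun c => if PySem.Str.isalnum c then c else '-')) := by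
  induction l with
  | nil => intro acc pd; simp [pvCollapse]
  | cons c rest ih =>
    intro acc pd
    rw [List.foldl_cons]
    by_cases h : PySem.Str.isalnum c = true
    · rw [show pvStepA (acc, pd) c = (acc ++ [c], false) from by simp [pvStepA, h]]
      simp [ih, pvCollapse, h, pv_isalnum_ne_dash c h]
    · cases pd with
      | false =>
        rw [show pvStepA (acc, false) c = (acc ++ ['-'], true) from by simp [pvStepA, h]]
        simp [ih, pvCollapse, h]
      | true =>
        rw [show pvStepA (acc, true) c = (acc, true) from by simp [pvStepA, h]]
        simp [ih, pvCollapse, h]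

lemma pvB_filter (l : List Char) : ∀ (prev : Char),
    ((l.zip (prev :: l)).filterMap
      (fun p => if p.1 ≠ '-' ∨ p.2 ≠ '-' then some p.1 else none))
      = pvCollapse (prev == '-') l := by
  induction l with
  | nil => intro prev; simp [pvCollapse]
  | cons c rest ih =>
    intro prev
    simp only [List.zip_cons_cons, List.filterMap_cons]
    by_cases hc : c = '-'
    · by_cases hp : prev = '-'
      · simp [hc, hp, ih, pvCollapse]
      · simp [hc, hp, ih, pvCollapse]
    · have hcb : (c == '-') = false := by simp [hc]
      simp [hc, ih, pvCollapse, hcb]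

-- ===== VERDICT (by name: the statement is the Claim_ definition above) =====
theorem slug_anchor_py_spec : Claim_equal_slug_anchor_py := by
  intro text _
  unfold Spec_slug_anchor_py slug_anchor_py slug_anchor_py_alt
  simp only [pvA_loop, pvB_filter, List.nil_append]
  rw [show (' ' == '-') = false from by decide]
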